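-- pv_equiv track=rewrite | github.com/Yihang-Y/chainlit | backend/chainlit/socket.py | find_subtree_end_index
-- ===== SOURCE A (Python) =====
-- def _build_parent_map(steps_data):
--     parent_map = {}
--     for s in steps_data:
--         sid = str(s.get("step_id"))
--         pid = s.get("step_parentid")
--         parent_map[sid] = str(pid) if pid is not None else None
--     return parent_map
--
-- def _is_descendant(node_id: str, ancestor_id: str, parent_map: dict) -> bool:
--     cur = node_id
--     # 向上爬 parent 链
--     while cur is not None:
--         p = parent_map.get(cur)
--         if p is None:
--             return False
--         if p == ancestor_id:
--             return True
--         cur = p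
--     return False
--
-- def find_subtree_end_index(steps_data, parent_id: str) -> int:
--     parent_id = str(parent_id)
--     parent_map = _build_parent_map(steps_data)
--
--     parent_index = -1
--     for i, s in enumerate(steps_data):
--         if str(s.get("step_id")) == parent_id:
--             parent_index = i
--             break
--     if parent_index == -1:
--         return -1
--
--     end = parent_index
--     for i in range(parent_index + 1, len(steps_data)):
--         sid = str(steps_data[i].get("step_id"))
--         if _is_descendant(sid, parent_id, parent_map):
--             end = i
--     return end
-- ===== SOURCE B (Python) =====
-- def find_subtree_end_index(steps_data, parent_id):
--     parent_id = str(parent_id)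
--     parent_map = {}
--     for s in steps_data:
--         pid = s.get("step_parentid")
--         parent_map[str(s.get("step_id"))] = str(pid) if pid is not None else None
--
--     parent_index = -1
--     for i, s in enumerate(steps_data):
--         if str(s.get("step_id")) == parent_id:
--             parent_index = i
--             break
--     if parent_index == -1:
--         return -1
--
--     # Memoized descendant test: each parent chain is climbed once overall.
--     memo = {}
--
--     def desc(node):
--         seen = []
--         cur = node
--         while cur not in memo:
--             p = parent_map.get(cur)
--             if p is None:
--                 memo[cur] = False
--                 break
--             if p == parent_id:
--                 memo[cur] = True
--                 break
--             seen.append(cur)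
--             cur = p
--         r = memo[cur]
--         for x in seen:
--             memo[x] = r
--         return r
--
--     # Scan from the back: the first descendant found is the last one overall.
--     i = len(steps_data) - 1
--     while i > parent_index:
--         if desc(str(steps_data[i].get("step_id"))):
--             return i
--         i -= 1
--     return parent_index
-- ===== Notes on version B (the rewrite author's own statement) =====
-- stated objective: alternative
-- what changed: B classifies nodes as descendants with a memo dictionary shared across queries (each parent chain is climbed once overall) and scans the steps back-to-front, returning at the first descendant found (the last overall), instead of A's per-index unmemoized chain climb over the whole suffix.
import Mathlib
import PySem

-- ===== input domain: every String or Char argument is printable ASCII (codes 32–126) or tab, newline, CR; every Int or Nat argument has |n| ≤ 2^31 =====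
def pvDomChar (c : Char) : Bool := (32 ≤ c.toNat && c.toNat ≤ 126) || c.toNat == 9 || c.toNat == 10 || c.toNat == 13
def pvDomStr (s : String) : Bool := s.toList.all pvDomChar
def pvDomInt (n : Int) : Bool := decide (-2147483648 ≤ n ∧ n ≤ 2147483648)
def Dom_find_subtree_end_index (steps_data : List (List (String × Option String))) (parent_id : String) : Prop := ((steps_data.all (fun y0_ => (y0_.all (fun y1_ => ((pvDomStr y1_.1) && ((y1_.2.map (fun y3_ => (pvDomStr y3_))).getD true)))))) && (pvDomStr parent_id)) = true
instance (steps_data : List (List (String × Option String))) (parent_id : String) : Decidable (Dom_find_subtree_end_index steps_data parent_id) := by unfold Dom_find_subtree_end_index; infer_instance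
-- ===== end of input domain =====

-- B replaces A's per-index unmemoized parent-chain climb by a memoized classification plus
-- a back-to-front scan that stops at the first (= last overall) descendant; objective:
-- alternative (each parent chain is climbed once overall instead of once per query).

-- ===== PORT A =====
-- s.get(k) in Python is None both when the key is missing and when the stored value is None;
-- lookup on the association list is first-match (dict keys are unique).
def pvGet (s : List (String × Option String)) (k : String) : Option String :=
  match s.lookup k with
  | some (some v) => some v
  | _ => none

-- str(s.get("step_id")): str(None) = "None"; str of a string is itself
def pvSid (s : List (String × Option String)) : String := (pvGet s "step_id").getD "None"

-- str(pid) if pid is not None else None  (str of a string is itself)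
def pvPid (s : List (String × Option String)) : Option String := pvGet s "step_parentid"

-- _build_parent_map
def pvBuildParentMap (steps_data : List (List (String × Option String))) :
    PySem.Dict String (Option String) :=
  steps_data.foldl (fun d s => d.insert (pvSid s) (pvPid s)) PySem.Dict.empty

-- _is_descendant: climbs the parent chain; the fuel argument is only a totality guard
-- (Pre_ guarantees every queried chain resolves within steps_data.length + 1 hops).
def pvIsDescendant (pm : PySem.Dict String (Option String)) (ancestor : String) :
    Nat → String → Bool
  | 0, _ => false
  | fuel+1, cur =>
    match pm.get? cur with
    | none => false          -- cur not a key: p is None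
    | some none => false     -- stored parent is None
    | some (some p) => if p = ancestor then true else pvIsDescendant pm ancestor fuel p

def find_subtree_end_index (steps_data : List (List (String × Option String)))
    (parent_id : String) : Int :=
  let pm := pvBuildParentMap steps_data
  -- first-match loop with break, parent_index == -1 check
  match steps_data.findIdx? (fun s => pvSid s == parent_id) with
  | none => -1
  | some parent_index =>
    -- range(parent_index+1, len(steps_data)) over in-range nonnegative indices:
    -- List.range' (parent_index+1) (len - (parent_index+1)) is exact; steps_data[i] with
    -- i < len is exactly getD i []
    (List.range' (parent_index+1) (steps_data.length - (parent_index+1))).foldl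
      (fun e i =>
        if pvIsDescendant pm parent_id (steps_data.length + 1) (pvSid (steps_data.getD i []))
        then (i : Int) else e)
      (parent_index : Int)

-- ===== PORT B =====
-- desc(node): climb until a memoized node / chain end / parent_id, then record the shared
-- result for every node passed on the way (the `seen` list); fuel is only a totality guard.
def pvDescGo (pm : PySem.Dict String (Option String)) (parent_id : String) :
    Nat → String → List String → PySem.Dict String Bool → Bool × PySem.Dict String Bool
  | 0, _, _, memo => (false, memo)   -- unreachable under Pre_
  | fuel+1, cur, seen, memo =>
    if memo.contains cur then
      let r := memo.getD cur false
      (r, seen.foldl (fun m x => m.insert x r) memo)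
    else
      match pm.get? cur with
      | none =>
        (false, seen.foldl (fun m x => m.insert x false) (memo.insert cur false))
      | some none =>
        (false, seen.foldl (fun m x => m.insert x false) (memo.insert cur false))
      | some (some p) =>
        if p = parent_id then
          (true, seen.foldl (fun m x => m.insert x true) (memo.insert cur true))
        else pvDescGo pm parent_id fuel p (cur :: seen) memo

-- `i = len-1; while i > parent_index: …; i -= 1`, with k = i - parent_index as the recursion counter
def pvScanDown (steps_data : List (List (String × Option String)))
    (pm : PySem.Dict String (Option String)) (parent_id : String) (parent_index : Nat) :
    Nat → PySem.Dict String Bool → Int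
  | 0, _ => (parent_index : Int)
  | k+1, memo =>
    let i := parent_index + (k+1)
    let res := pvDescGo pm parent_id (steps_data.length + 1) (pvSid (steps_data.getD i [])) [] memo
    if res.1 then (i : Int) else pvScanDown steps_data pm parent_id parent_index k res.2

def find_subtree_end_index_alt (steps_data : List (List (String × Option String)))
    (parent_id : String) : Int :=
  let pm := steps_data.foldl (fun d s => d.insert (pvSid s) (pvPid s)) PySem.Dict.empty
  match steps_data.findIdx? (fun s => pvSid s == parent_id) with
  | none => -1
  | some parent_index =>
    pvScanDown steps_data pm parent_id parent_index
      (steps_data.length - 1 - parent_index) PySem.Dict.empty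

-- ===== PRECONDITION & SPEC =====
-- chain shape of the input's parent graph: the chain from `cur` reaches a missing/None
-- parent or parent_id within the given number of hops (this only describes the input's
-- parent links — it computes no descendant index and copies neither port's algorithm)
def pvChainTerm (pm : PySem.Dict String (Option String)) (parent_id : String) :
    Nat → String → Bool
  | 0, _ => false
  | f+1, cur =>
    match pm.get? cur with
    | none => true
    | some none => true
    | some (some p) => decide (p = parent_id) || pvChainTerm pm parent_id f p

-- Pre_ requires every step's parent chain to resolve (reach a missing/None parent or
-- parent_id) within |steps_data|+1 hops, i.e. no chain runs into a cycle avoiding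
-- parent_id: on such inputs A's unbounded parent-chain climb loops forever; on the
-- excluded inputs where A still returns (the cyclic chain lies before the parent, or
-- parent_id is absent so no chain is ever climbed) B returns the same value.
def Pre_find_subtree_end_index (steps_data : List (List (String × Option String)))
    (parent_id : String) : Prop :=
  ∀ s ∈ steps_data,
    pvChainTerm (pvBuildParentMap steps_data) parent_id (steps_data.length + 1) (pvSid s) = true

instance (steps_data : List (List (String × Option String))) (parent_id : String) : Decidable (Pre_find_subtree_end_index steps_data parent_id) := by unfold Pre_find_subtree_end_index; infer_instance

def pvWitness_find_subtree_end_index : (List (List (String × Option String))) × String :=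
  ([[("step_id", some "a"), ("step_parentid", some "p")],
    [("step_id", some "p"), ("step_parentid", none)]], "p")

def Spec_find_subtree_end_index (steps_data : List (List (String × Option String))) (parent_id : String) (out : Int) : Prop := out = find_subtree_end_index_alt steps_data parent_id
instance (steps_data : List (List (String × Option String))) (parent_id : String) (out : Int) : Decidable (Spec_find_subtree_end_index steps_data parent_id out) := by unfold Spec_find_subtree_end_index; infer_instance

-- ===== CLAIM (what is proved, stated in full; the proofs are below) =====
def Claim_equal_find_subtree_end_index : Prop := ∀ (steps_data : List (List (String × Option String))) (parent_id : String), Dom_find_subtree_end_index steps_data parent_id → Pre_find_subtree_end_index steps_data parent_id → Spec_find_subtree_end_index steps_data parent_id (find_subtree_end_index steps_data parent_id)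

-- ===== LEMMAS AND PROOFS =====

-- chain termination is monotone in the hop bound
theorem pvChainTerm_mono (pm : PySem.Dict String (Option String)) (a : String) :
    ∀ (f : Nat) (c : String), pvChainTerm pm a f c = true → pvChainTerm pm a (f+1) c = true := by
  intro f
  induction f with
  | zero => intro c h; simp [pvChainTerm] at h
  | succ f ih =>
    intro c h
    simp only [pvChainTerm] at h ⊢
    cases hg : pm.get? c with
    | none => rfl
    | some o =>
      cases o with
      | none => rfl
      | some p =>
        rw [hg] at h; simp only [Bool.or_eq_true, decide_eq_true_eq] at h ⊢
        rcases h with h | h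
        · exact Or.inl h
        · exact Or.inr (ih p h)

theorem pvChainTerm_le (pm : PySem.Dict String (Option String)) (a : String)
    {f g : Nat} (hfg : f ≤ g) {c : String} (h : pvChainTerm pm a f c = true) :
    pvChainTerm pm a g c = true := by
  induction g with
  | zero =>
    have hf0 : f = 0 := Nat.le_zero.mp hfg
    rw [hf0] at h; exact h
  | succ g ih =>
    rcases Nat.lt_or_ge f (g+1) with hlt | hge
    · exact pvChainTerm_mono pm a g c (ih (by omega))
    · have : f = g + 1 := by omega
      subst this; exact h

-- on a terminating chain, _is_descendant's value is stable once the fuel suffices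
theorem pvIsDescendant_stable (pm : PySem.Dict String (Option String)) (a : String) :
    ∀ (f : Nat) (c : String), pvChainTerm pm a f c = true →
      pvIsDescendant pm a f c = pvIsDescendant pm a (f+1) c := by
  intro f
  induction f with
  | zero => intro c h; simp [pvChainTerm] at h
  | succ f ih =>
    intro c h
    simp only [pvChainTerm] at h
    simp only [pvIsDescendant]
    cases hg : pm.get? c with
    | none => rfl
    | some o =>
      cases o with
      | none => rfl
      | some p =>
        rw [hg] at h; simp only [Bool.or_eq_true, decide_eq_true_eq] at h
        by_cases hp : p = a
        · simp [hp]
        · simp only [if_neg hp]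
          rcases h with h | h
          · exact absurd h hp
          · exact ih p h

theorem pvIsDescendant_of_le (pm : PySem.Dict String (Option String)) (a : String)
    {f g : Nat} (hfg : f ≤ g) {c : String} (h : pvChainTerm pm a f c = true) :
    pvIsDescendant pm a g c = pvIsDescendant pm a f c := by
  induction g with
  | zero =>
    have : f = 0 := by omega
    subst this; rfl
  | succ g ih =>
    rcases Nat.lt_or_ge f (g+1) with hlt | hge
    · have hfg' : f ≤ g := by omega
      rw [← pvIsDescendant_stable pm a g c (pvChainTerm_le pm a hfg' h), ih hfg']
    · have : f = g + 1 := by omega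
      subst this; rfl

-- one chain step preserves the (stable-fuel) descendant value and chain termination
theorem pvStep (pm : PySem.Dict String (Option String)) (a : String) (N : Nat)
    {c p : String} (hN : pvChainTerm pm a (N+1) c = true)
    (hg : pm.get? c = some (some p)) (hp : p ≠ a) :
    pvIsDescendant pm a (N+1) c = pvIsDescendant pm a (N+1) p ∧
      pvChainTerm pm a (N+1) p = true := by
  have hct : pvChainTerm pm a N p = true := by
    simp only [pvChainTerm, hg, Bool.or_eq_true, decide_eq_true_eq] at hN
    rcases hN with h | h
    · exact absurd h hp
    · exact h
  constructor
  · simp only [pvIsDescendant, hg, if_neg hp]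
    exact (pvIsDescendant_stable pm a N p hct).symm ▸
      (pvIsDescendant_of_le pm a (Nat.le_succ N) hct).symm
  · exact pvChainTerm_mono pm a N p hct

-- writing one shared correct value for a batch of keys preserves memo soundness
theorem pvWriteAll_sound (pm : PySem.Dict String (Option String)) (a : String) (N : Nat)
    (v : Bool) :
    ∀ (l : List String) (m : PySem.Dict String Bool),
      (∀ k b, m.get? k = some b → b = pvIsDescendant pm a N k) →
      (∀ x ∈ l, pvIsDescendant pm a N x = v) →
      ∀ k b, (l.foldl (fun m x => m.insert x v) m).get? k = some b →
        b = pvIsDescendant pm a N k := by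
  intro l
  induction l with
  | nil => intro m hm _ k b h; exact hm k b h
  | cons x l ih =>
    intro m hm hl k b h
    refine ih (m.insert x v) ?_ (fun y hy => hl y (List.mem_cons_of_mem x hy)) k b h
    intro k' b' h'
    rcases eq_or_ne k' x with rfl | hne
    · rw [PySem.Dict.get?_insert_self] at h'
      cases h'
      exact (hl _ (by simp)).symm
    · rw [PySem.Dict.get?_insert_of_ne m v hne] at h'
      exact hm k' b' h'

-- desc(node) returns the memoless descendant value and keeps the memo sound
theorem pvDescGo_spec (pm : PySem.Dict String (Option String)) (a : String) (N : Nat) :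
    ∀ (fuel : Nat) (c : String) (seen : List String) (memo : PySem.Dict String Bool),
      (∀ k b, memo.get? k = some b → b = pvIsDescendant pm a (N+1) k) →
      pvChainTerm pm a fuel c = true →
      pvChainTerm pm a (N+1) c = true →
      (∀ x ∈ seen, pvIsDescendant pm a (N+1) x = pvIsDescendant pm a (N+1) c) →
      (pvDescGo pm a fuel c seen memo).1 = pvIsDescendant pm a (N+1) c ∧
        (∀ k b, (pvDescGo pm a fuel c seen memo).2.get? k = some b →
          b = pvIsDescendant pm a (N+1) k) := by
  intro fuel
  induction fuel with
  | zero => intro c seen memo _ hf _ _; simp [pvChainTerm] at hf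
  | succ fuel ih =>
    intro c seen memo hInv hf hN hseen
    simp only [pvDescGo]
    by_cases hc : memo.contains c = true
    · simp only [hc, if_true]
      have ⟨b, hb⟩ : ∃ b, memo.get? c = some b := by
        rw [PySem.Dict.contains_eq_isSome_get?] at hc
        exact Option.isSome_iff_exists.mp hc
      have hbd : b = pvIsDescendant pm a (N+1) c := hInv c b hb
      have hget : memo.getD c false = pvIsDescendant pm a (N+1) c := by
        rw [PySem.Dict.getD_eq_get?_getD, hb]; exact hbd
      refine ⟨hget, ?_⟩
      rw [hget]
      exact pvWriteAll_sound pm a (N+1) _ seen memo hInv hseen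
    · simp only [Bool.not_eq_true] at hc
      simp only [hc, Bool.false_eq_true, if_false]
      cases hg : pm.get? c with
      | none =>
        have hdc : pvIsDescendant pm a (N+1) c = false := by
          simp [pvIsDescendant, hg]
        refine ⟨hdc.symm, ?_⟩
        refine pvWriteAll_sound pm a (N+1) false seen (memo.insert c false) ?_
          (fun x hx => (hseen x hx).trans hdc)
        intro k b h
        rcases eq_or_ne k c with rfl | hne
        · rw [PySem.Dict.get?_insert_self] at h; cases h; exact hdc.symm
        · rw [PySem.Dict.get?_insert_of_ne memo false hne] at h; exact hInv k b h
      | some o =>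
        cases o with
        | none =>
          have hdc : pvIsDescendant pm a (N+1) c = false := by
            simp [pvIsDescendant, hg]
          refine ⟨hdc.symm, ?_⟩
          refine pvWriteAll_sound pm a (N+1) false seen (memo.insert c false) ?_
            (fun x hx => (hseen x hx).trans hdc)
          intro k b h
          rcases eq_or_ne k c with rfl | hne
          · rw [PySem.Dict.get?_insert_self] at h; cases h; exact hdc.symm
          · rw [PySem.Dict.get?_insert_of_ne memo false hne] at h; exact hInv k b h
        | some p =>
          by_cases hp : p = a
          · simp only [hp, if_true]
            have hdc : pvIsDescendant pm a (N+1) c = true := by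
              simp [pvIsDescendant, hg, hp]
            refine ⟨hdc.symm, ?_⟩
            refine pvWriteAll_sound pm a (N+1) true seen (memo.insert c true) ?_
              (fun x hx => (hseen x hx).trans hdc)
            intro k b h
            rcases eq_or_ne k c with rfl | hne
            · rw [PySem.Dict.get?_insert_self] at h; cases h; exact hdc.symm
            · rw [PySem.Dict.get?_insert_of_ne memo true hne] at h; exact hInv k b h
          · simp only [if_neg hp]
            have hfp : pvChainTerm pm a fuel p = true := by
              simp only [pvChainTerm, hg, Bool.or_eq_true, decide_eq_true_eq] at hf
              rcases hf with h | h
              · exact absurd h hp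
              · exact h
            obtain ⟨hdeq, hNp⟩ := pvStep pm a N hN hg hp
            have := ih p (c :: seen) memo hInv hfp hNp
              (by
                intro x hx
                rcases List.mem_cons.mp hx with rfl | hx
                · exact hdeq
                · exact (hseen x hx).trans hdeq)
            rw [hdeq]
            exact this

-- the backward scan with memo equals A's forward "keep the last descendant index" fold
theorem pvScanDown_eq (steps_data : List (List (String × Option String))) (a : String)
    (hpre : Pre_find_subtree_end_index steps_data a) (pi : Nat) :
    ∀ (k : Nat) (memo : PySem.Dict String Bool),
      (∀ k' b, memo.get? k' = some b →
        b = pvIsDescendant (pvBuildParentMap steps_data) a (steps_data.length + 1) k') →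
      pi + k < steps_data.length →
      pvScanDown steps_data (pvBuildParentMap steps_data) a pi k memo =
        (List.range' (pi+1) k).foldl
          (fun e i =>
            if pvIsDescendant (pvBuildParentMap steps_data) a (steps_data.length + 1)
                (pvSid (steps_data.getD i []))
            then (i : Int) else e)
          (pi : Int) := by
  intro k
  induction k with
  | zero => intro memo _ _; rfl
  | succ k ih =>
    intro memo hInv hlt
    have hi : pi + (k+1) < steps_data.length := hlt
    have hmem : steps_data.getD (pi + (k+1)) [] ∈ steps_data := by
      rw [List.getD_eq_getElem steps_data [] hi]; exact List.getElem_mem hi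
    have hct := hpre _ hmem
    obtain ⟨hval, hInv'⟩ := pvDescGo_spec (pvBuildParentMap steps_data) a steps_data.length
      (steps_data.length + 1) (pvSid (steps_data.getD (pi + (k+1)) [])) [] memo hInv hct hct
      (by intro x hx; cases hx)
    rw [List.range'_1_concat]
    rw [List.foldl_append]
    simp only [List.foldl_cons, List.foldl_nil]
    simp only [pvScanDown]
    rw [hval]
    have harith : pi + 1 + k = pi + (k + 1) := by omega
    rw [harith]
    split_ifs with hD
    · rfl
    · exact ih _ hInv' (by omega)

-- ===== VERDICT (by name: the statement is the Claim_ definition above) =====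
theorem find_subtree_end_index_spec : Claim_equal_find_subtree_end_index := by
  intro steps_data parent_id _dom hpre
  unfold Spec_find_subtree_end_index
  have hbm : (steps_data.foldl (fun d s => d.insert (pvSid s) (pvPid s)) PySem.Dict.empty)
      = pvBuildParentMap steps_data := rfl
  unfold find_subtree_end_index find_subtree_end_index_alt
  simp only []
  rw [hbm]
  cases hidx : steps_data.findIdx? (fun s => pvSid s == parent_id) with
  | none => rfl
  | some pi =>
    have hpi : pi < steps_data.length := by
      have := List.findIdx?_eq_some_iff_findIdx_eq.mp hidx
      omega
    simp only []
    rw [pvScanDown_eq steps_data parent_id hpre pi (steps_data.length - 1 - pi)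
        PySem.Dict.empty
        (by intro k b h; rw [PySem.Dict.get?_empty] at h; cases h)
        (by omega)]
    have hcnt : steps_data.length - (pi + 1) = steps_data.length - 1 - pi := by omega
    rw [hcnt]
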